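-- pv_equiv track=rewrite | github.com/IBM/ibm-watsonx-orchestrate-adk | src/ibm_watsonx_orchestrate/flow_builder/masking_utils.py | _split_node_path_and_property_chain
-- ===== SOURCE A (Python) =====
-- from typing import List, Tuple, Union, Optional
--
-- def _split_node_path_and_property_chain(parts: List[str]) -> Tuple[List[str], List[str]]:
--     """
--     Split parsed path parts into node path and property chain using a single pass.
--
--     Preserves current behavior by treating the first occurrence of 'output'
--     after 'flow' as the delimiter.
--     """
--     node_path = []
--     property_chain = []
--     found_output = False
--
--     for part in parts[1:]:
--         if not found_output and part == 'output':
--             found_output = True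
--             continue
--         if found_output:
--             property_chain.append(part)
--         else:
--             node_path.append(part)
--
--     return node_path, property_chain
-- ===== SOURCE B (Python) =====
-- def _split_node_path_and_property_chain(parts):
--     rest = parts[1:]
--     try:
--         i = rest.index('output')
--     except ValueError:
--         return rest, []
--     return rest[:i], rest[i + 1:]
-- ===== Notes on version B (the rewrite author's own statement) =====
-- stated objective: simpler
-- what changed: Replaces the single-pass flag-based accumulation with locate-the-first-'output'-then-slice: rest.index('output') and two slices (or (rest, []) when absent).
import Mathlib
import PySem

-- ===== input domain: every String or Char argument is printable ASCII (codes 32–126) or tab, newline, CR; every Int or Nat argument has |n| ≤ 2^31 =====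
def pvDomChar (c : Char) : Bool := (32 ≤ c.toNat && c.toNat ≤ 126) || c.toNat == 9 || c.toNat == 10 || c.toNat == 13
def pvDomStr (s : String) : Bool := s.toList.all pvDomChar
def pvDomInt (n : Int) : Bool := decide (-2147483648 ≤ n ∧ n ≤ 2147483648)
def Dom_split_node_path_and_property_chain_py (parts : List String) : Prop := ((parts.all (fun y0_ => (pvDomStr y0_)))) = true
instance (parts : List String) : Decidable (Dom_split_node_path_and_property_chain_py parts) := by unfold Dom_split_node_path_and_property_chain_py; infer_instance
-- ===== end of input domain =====

-- B replaces the flag-based single pass with find-first-'output'-then-slice; objective: simpler.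


-- ===== PORT A =====
def split_node_path_and_property_chain_py (parts : List String) : List String × List String :=
  -- for part in parts[1:] with state (node_path, property_chain, found_output)
  let r := (PySem.List.slice parts (some 1) none).foldl
    (fun (st : List String × List String × Bool) part =>
      let (node_path, property_chain, found_output) := st
      if !found_output && part == "output" then (node_path, property_chain, true)
      else if found_output then (node_path, property_chain ++ [part], found_output)
      else (node_path ++ [part], property_chain, found_output))
    ([], [], false)
  (r.1, r.2.1)

-- ===== PORT B =====
def split_node_path_and_property_chain_py_alt (parts : List String) : List String × List String :=
  let rest := PySem.List.slice parts (some 1) none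
  match PySem.List.index? rest "output" with
  | none => (rest, [])
  | some i => (PySem.List.slice rest none (some (i : Int)),
               PySem.List.slice rest (some ((i : Int) + 1)) none)

-- ===== PRECONDITION & SPEC =====
def Spec_split_node_path_and_property_chain_py (parts : List String) (out : List String × List String) : Prop := out = split_node_path_and_property_chain_py_alt parts
instance (parts : List String) (out : List String × List String) : Decidable (Spec_split_node_path_and_property_chain_py parts out) := by unfold Spec_split_node_path_and_property_chain_py; infer_instance

-- ===== CLAIM (what is proved, stated in full; the proofs are below) =====
def Claim_equal_split_node_path_and_property_chain_py : Prop := ∀ (parts : List String), Dom_split_node_path_and_property_chain_py parts → Spec_split_node_path_and_property_chain_py parts (split_node_path_and_property_chain_py parts)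

-- ===== LEMMAS AND PROOFS =====

-- A's loop body, named so the lemmas can talk about it
def pvStepA (st : List String × List String × Bool) (part : String) : List String × List String × Bool :=
  if !st.2.2 && part == "output" then (st.1, st.2.1, true)
  else if st.2.2 then (st.1, st.2.1 ++ [part], st.2.2)
  else (st.1 ++ [part], st.2.1, st.2.2)

lemma loopA_true (rest : List String) (np pc : List String) :
    rest.foldl pvStepA (np, pc, true) = (np, pc ++ rest, true) := by
  induction rest generalizing pc with
  | nil => simp
  | cons x xs ih => simp [pvStepA, ih]

lemma loopA_false (rest : List String) (np : List String) :
    rest.foldl pvStepA (np, [], false) =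
      match PySem.List.index? rest "output" with
      | none => (np ++ rest, [], false)
      | some i => (np ++ rest.take i, rest.drop (i + 1), true) := by
  induction rest generalizing np with
  | nil => simp
  | cons x xs ih =>
    by_cases hx : x = "output"
    · subst hx
      rw [PySem.List.index?_cons_self]
      simp only [List.foldl_cons, pvStepA, beq_self_eq_true]
      simp [loopA_true]
    · rw [PySem.List.index?_cons_of_ne xs hx]
      have hb : (x == "output") = false := by simpa using hx
      simp only [List.foldl_cons, pvStepA, hb, Bool.not_false, Bool.and_false,
        if_neg Bool.false_ne_true]
      rw [ih (np ++ [x])]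
      cases h : PySem.List.index? xs "output" with
      | none => simp
      | some i => simp [List.drop_succ_cons]

-- ===== VERDICT (by name: the statement is the Claim_ definition above) =====
theorem split_node_path_and_property_chain_py_spec : Claim_equal_split_node_path_and_property_chain_py := by
  intro parts _
  unfold Spec_split_node_path_and_property_chain_py
  unfold split_node_path_and_property_chain_py split_node_path_and_property_chain_py_alt
  have hstep : (fun (st : List String × List String × Bool) part =>
      let (node_path, property_chain, found_output) := st
      if !found_output && part == "output" then (node_path, property_chain, true)
      else if found_output then (node_path, property_chain ++ [part], found_output)
      else (node_path ++ [part], property_chain, found_output)) = pvStepA := by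
    funext st part; cases st with
    | mk a b => cases b with
      | mk c d => simp [pvStepA]
  simp only [hstep]
  rw [loopA_false _ []]
  cases h : PySem.List.index? (PySem.List.slice parts (some 1) none) "output" with
  | none => simp
  | some i =>
    have hs1 : PySem.List.slice (PySem.List.slice parts (some 1)) none (some (i : Int))
        = List.take i (PySem.List.slice parts (some 1)) := by
      rw [PySem.List.slice_to _ (by omega)]
      norm_num
    have hs2 : PySem.List.slice (PySem.List.slice parts (some 1)) (some ((i : Int) + 1)) none
        = List.drop (i + 1) (PySem.List.slice parts (some 1)) := by
      rw [PySem.List.slice_from _ (by omega)]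
      norm_num
    simp [hs1, hs2]
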